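-- pv_equiv track=rewrite | github.com/Himaja63/cp_problems | 11-dicetoorderedhand-Python/dicetoorderedhand.py | dicetoorderedhand
-- ===== SOURCE A (Python) =====
-- def dicetoorderedhand(a, b, c):
-- 	if (a == b == c):
-- 		return int(str(a)+str(b)+str(c))
-- 	elif (a == b and c != a):
-- 		if (a > c):
-- 			return int(str(a)+str(b)+str(c))
-- 		else:
-- 			return int(str(c)+str(a)+str(b))
-- 	elif(b == c and a != b):
-- 		if (b > a):
-- 			return int(str(b)+str(c)+str(a))
-- 		else:
-- 			return int(str(a)+str(b)+str(c))
-- 	elif (a == c and b != a):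
-- 		if (a > b):
-- 			return int(str(a)+str(c)+str(b))
-- 		else:
-- 			return int(str(b)+str(a)+str(c))
--
-- 	else :
-- 		l = []
-- 		l.append(a)
-- 		l.append(b)
-- 		l.append(c)
-- 		t = tuple(l)
-- 		ma = max(t)
-- 		mi = min(t)
-- 		for i in t:
-- 			if (i != ma and i != mi):
-- 				mid = i
-- 		s = str(ma)+str(mid)+str(mi)
-- 		return int(s)
-- ===== SOURCE B (Python) =====
-- def dicetoorderedhand(a, b, c):
--     return int("".join(str(x) for x in sorted([a, b, c], reverse=True)))
-- ===== Notes on version B (the rewrite author's own statement) =====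
-- stated objective: simpler
-- what changed: Replaces A's five-branch equality/ordering case tree (with a max/min/mid scan in the all-distinct case) by a single descending sort followed by digit-string concatenation.
import Mathlib
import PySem

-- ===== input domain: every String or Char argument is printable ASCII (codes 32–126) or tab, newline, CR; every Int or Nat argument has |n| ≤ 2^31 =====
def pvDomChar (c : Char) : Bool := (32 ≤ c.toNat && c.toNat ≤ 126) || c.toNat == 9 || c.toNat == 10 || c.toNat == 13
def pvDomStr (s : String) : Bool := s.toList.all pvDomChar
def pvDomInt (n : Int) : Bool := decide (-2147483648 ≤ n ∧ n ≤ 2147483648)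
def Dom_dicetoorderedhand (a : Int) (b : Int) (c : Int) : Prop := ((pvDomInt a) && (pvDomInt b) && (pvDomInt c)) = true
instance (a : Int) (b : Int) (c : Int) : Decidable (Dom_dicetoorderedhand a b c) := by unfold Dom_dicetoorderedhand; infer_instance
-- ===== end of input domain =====

-- B replaces A's equality/ordering case tree by a descending sort + concatenation (objective: simpler).

-- ===== PORT A =====
-- int(str(x)+str(y)+str(z)); exact via PySem.Int.toChars / ofChars?; getD 0 unreachable under Pre_
def pvCat3 (x y z : Int) : Int :=
  (PySem.Int.ofChars? (PySem.Int.toChars x ++ PySem.Int.toChars y ++ PySem.Int.toChars z)).getD 0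

def dicetoorderedhand (a : Int) (b : Int) (c : Int) : Int :=
  if a = b ∧ b = c then pvCat3 a b c
  else if a = b ∧ c ≠ a then
    (if a > c then pvCat3 a b c else pvCat3 c a b)
  else if b = c ∧ a ≠ b then
    (if b > a then pvCat3 b c a else pvCat3 a b c)
  else if a = c ∧ b ≠ a then
    (if a > b then pvCat3 a c b else pvCat3 b a c)
  else
    let t : List Int := [a, b, c]
    let ma : Int := (PySem.List.max? t (fun x => x)).getD 0   -- t nonempty: getD unreachable
    let mi : Int := (PySem.List.min? t (fun x => x)).getD 0
    -- the for-loop keeping the last i with i ≠ ma ∧ i ≠ mi (NameError if none; unreachable here)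
    let mid : Int :=
      (t.foldl (fun m i => if i ≠ ma ∧ i ≠ mi then some i else m) (none : Option Int)).getD 0
    pvCat3 ma mid mi

-- ===== PORT B =====
def dicetoorderedhand_alt (a : Int) (b : Int) (c : Int) : Int :=
  let ord := PySem.List.sorted [a, b, c] (fun x => x) true
  (PySem.Int.ofChars? (PySem.Chars.join [] (ord.map PySem.Int.toChars))).getD 0

-- ===== PRECONDITION & SPEC =====
-- A raises ValueError (int() on a string with an embedded '-') whenever any argument is
-- negative; B raises the same way there, so Pre_ excludes exactly the raising inputs.
def Pre_dicetoorderedhand (a : Int) (b : Int) (c : Int) : Prop := 0 ≤ a ∧ 0 ≤ b ∧ 0 ≤ c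
instance (a : Int) (b : Int) (c : Int) : Decidable (Pre_dicetoorderedhand a b c) := by
  unfold Pre_dicetoorderedhand; infer_instance
def pvWitness_dicetoorderedhand : Int × Int × Int := (3, 1, 4)

def Spec_dicetoorderedhand (a : Int) (b : Int) (c : Int) (out : Int) : Prop := out = dicetoorderedhand_alt a b c
instance (a : Int) (b : Int) (c : Int) (out : Int) : Decidable (Spec_dicetoorderedhand a b c out) := by unfold Spec_dicetoorderedhand; infer_instance

-- ===== CLAIM (what is proved, stated in full; the proofs are below) =====
def Claim_equal_dicetoorderedhand : Prop := ∀ (a : Int) (b : Int) (c : Int), Dom_dicetoorderedhand a b c → Pre_dicetoorderedhand a b c → Spec_dicetoorderedhand a b c (dicetoorderedhand a b c)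

-- ===== LEMMAS AND PROOFS =====

-- B's value when the descending order of [a,b,c] is [x,y,z]
theorem alt_eq_cat3 (a b c x y z : Int)
    (hperm : List.Perm [x, y, z] [a, b, c]) (hxy : y ≤ x) (hyz : z ≤ y) :
    dicetoorderedhand_alt a b c = pvCat3 x y z := by
  have hs : PySem.List.sorted [a, b, c] (fun x => x) true = [x, y, z] := by
    apply List.Perm.eq_of_pairwise
      (le := fun p q => q ≤ p)
      (fun _ _ _ _ h h' => le_antisymm h' h)
      (PySem.List.sorted_pairwise_rev [a, b, c] (fun x => x))
      (by simp [List.pairwise_cons]; exact ⟨⟨hxy, le_trans hyz hxy⟩, hyz⟩)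
      ((PySem.List.sorted_perm [a, b, c] (fun x => x) true).trans hperm.symm)
  simp [dicetoorderedhand_alt, hs, pvCat3, PySem.Chars.join, List.intercalate]

theorem perm3_cab (a b c : Int) : List.Perm [c, a, b] [a, b, c] :=
  (List.Perm.swap a c [b]).trans (List.Perm.cons a (List.Perm.swap b c []))

theorem perm3_bca (a b c : Int) : List.Perm [b, c, a] [a, b, c] :=
  (List.Perm.cons b (List.Perm.swap a c [])).trans (List.Perm.swap a b [c])

theorem perm3_cba (a b c : Int) : List.Perm [c, b, a] [a, b, c] :=
  (List.Perm.swap b c [a]).trans (perm3_bca a b c)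

theorem perm3_acb (a b c : Int) : List.Perm [a, c, b] [a, b, c] :=
  List.Perm.cons a (List.Perm.swap b c [])

theorem perm3_bac (a b c : Int) : List.Perm [b, a, c] [a, b, c] :=
  List.Perm.swap a b [c]

-- ===== VERDICT (by name: the statement is the Claim_ definition above) =====
theorem dicetoorderedhand_spec : Claim_equal_dicetoorderedhand := by
  intro a b c _ _
  unfold Spec_dicetoorderedhand dicetoorderedhand
  split_ifs with h1 h2 h3 h4 h5 h6 h7
  · exact (alt_eq_cat3 a b c a b c (List.Perm.refl _) (by omega) (by omega)).symm
  · exact (alt_eq_cat3 a b c a b c (List.Perm.refl _) (by omega) (by omega)).symm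
  · exact (alt_eq_cat3 a b c c a b (perm3_cab a b c) (by omega) (by omega)).symm
  · exact (alt_eq_cat3 a b c b c a (perm3_bca a b c) (by omega) (by omega)).symm
  · exact (alt_eq_cat3 a b c a b c (List.Perm.refl _) (by omega) (by omega)).symm
  · exact (alt_eq_cat3 a b c a c b (perm3_acb a b c) (by omega) (by omega)).symm
  · exact (alt_eq_cat3 a b c b a c (perm3_bac a b c) (by omega) (by omega)).symm
  · -- else: a, b, c pairwise distinct
    have hab : a ≠ b := by omega
    have hbc : b ≠ c := by omega
    have hac : a ≠ c := by omega
    simp only [PySem.List.max?_id_cons, PySem.List.min?_id_cons, List.foldl,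
      Option.getD_some]
    rcases lt_or_gt_of_ne hab with hw1 | hw1 <;>
      rcases lt_or_gt_of_ne hbc with hw2 | hw2 <;>
      rcases lt_or_gt_of_ne hac with hw3 | hw3
    · -- a < b < c
      have e1 : max (max a b) c = c := by omega
      have e2 : min (min a b) c = a := by omega
      simp only [e1, e2]
      rw [if_neg (show ¬(c ≠ c ∧ c ≠ a) by omega)]
      rw [if_pos (show b ≠ c ∧ b ≠ a by omega)]
      exact (alt_eq_cat3 a b c c b a (perm3_cba a b c) (by omega) (by omega)).symm
    · omega
    · -- a < b, c < b, a < c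
      have e1 : max (max a b) c = b := by omega
      have e2 : min (min a b) c = a := by omega
      simp only [e1, e2]
      rw [if_pos (show c ≠ b ∧ c ≠ a by omega)]
      exact (alt_eq_cat3 a b c b c a (perm3_bca a b c) (by omega) (by omega)).symm
    · -- a < b, c < b, c < a
      have e1 : max (max a b) c = b := by omega
      have e2 : min (min a b) c = c := by omega
      simp only [e1, e2]
      rw [if_neg (show ¬(c ≠ b ∧ c ≠ c) by omega)]
      rw [if_neg (show ¬(b ≠ b ∧ b ≠ c) by omega)]
      rw [if_pos (show a ≠ b ∧ a ≠ c by omega)]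
      exact (alt_eq_cat3 a b c b a c (perm3_bac a b c) (by omega) (by omega)).symm
    · -- b < a, b < c, a < c
      have e1 : max (max a b) c = c := by omega
      have e2 : min (min a b) c = b := by omega
      simp only [e1, e2]
      rw [if_neg (show ¬(c ≠ c ∧ c ≠ b) by omega)]
      rw [if_neg (show ¬(b ≠ c ∧ b ≠ b) by omega)]
      rw [if_pos (show a ≠ c ∧ a ≠ b by omega)]
      exact (alt_eq_cat3 a b c c a b (perm3_cab a b c) (by omega) (by omega)).symm
    · -- b < a, b < c, c < a
      have e1 : max (max a b) c = a := by omega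
      have e2 : min (min a b) c = b := by omega
      simp only [e1, e2]
      rw [if_pos (show c ≠ a ∧ c ≠ b by omega)]
      exact (alt_eq_cat3 a b c a c b (perm3_acb a b c) (by omega) (by omega)).symm
    · omega
    · -- b < a, c < b, c < a
      have e1 : max (max a b) c = a := by omega
      have e2 : min (min a b) c = c := by omega
      simp only [e1, e2]
      rw [if_neg (show ¬(c ≠ a ∧ c ≠ c) by omega)]
      rw [if_pos (show b ≠ a ∧ b ≠ c by omega)]
      exact (alt_eq_cat3 a b c a b c (List.Perm.refl _) (by omega) (by omega)).symm
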